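-- pv_equiv track=rewrite | github.com/ile123/GA-2023 | Vjezba 6/batistic_ilario_vj6_helper_functions.py | generate_adjencacy_matrix
-- ===== SOURCE A (Python) =====
-- def generate_adjencacy_matrix(file_dict: dict):
--     cities = sorted(list(file_dict.keys()))
--     adjacency_matrix = [[0 for _ in range(len(cities))] for _ in range(len(cities))]
--     for i in range(len(cities)):
--         for j in range(len(cities)):
--             if i != j:
--                 from_city = cities[i]
--                 to_city = cities[j]
--                 distance = file_dict.get(from_city, {}).get(to_city)
--                 if distance:
--                     adjacency_matrix[i][j] = int(distance)
--     return cities, adjacency_matrix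
-- ===== SOURCE B (Python) =====
-- def generate_adjencacy_matrix(file_dict: dict):
--     cities = sorted(file_dict)
--     idx = {c: k for k, c in enumerate(cities)}
--     n = len(cities)
--     matrix = [[0] * n for _ in range(n)]
--     for from_city, inner in file_dict.items():
--         i = idx[from_city]
--         for to_city, distance in inner.items():
--             j = idx.get(to_city)
--             if j is not None and j != i and distance:
--                 matrix[i][j] = int(distance)
--     return cities, matrix
-- ===== Notes on version B (the rewrite author's own statement) =====
-- stated objective: faster
-- what changed: Instead of testing all n*n ordered city pairs with two chained dict lookups per cell, B builds a city->index dict once, allocates the zero matrix, and scatters only the edges actually present in the input dict into it.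
import Mathlib
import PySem

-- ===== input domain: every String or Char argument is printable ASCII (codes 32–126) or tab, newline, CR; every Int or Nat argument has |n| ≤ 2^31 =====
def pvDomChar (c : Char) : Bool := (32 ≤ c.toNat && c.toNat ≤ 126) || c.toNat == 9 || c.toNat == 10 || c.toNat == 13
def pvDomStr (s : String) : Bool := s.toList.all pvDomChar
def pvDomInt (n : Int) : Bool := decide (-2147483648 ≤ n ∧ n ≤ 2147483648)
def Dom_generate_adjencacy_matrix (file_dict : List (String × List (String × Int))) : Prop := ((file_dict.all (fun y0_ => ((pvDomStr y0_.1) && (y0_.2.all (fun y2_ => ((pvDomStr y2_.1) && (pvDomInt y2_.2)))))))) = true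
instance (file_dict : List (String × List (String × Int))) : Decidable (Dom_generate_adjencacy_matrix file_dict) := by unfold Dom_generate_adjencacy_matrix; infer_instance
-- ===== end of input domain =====

-- B replaces A's scan of all n*n city pairs (two chained dict lookups per cell) by a
-- city->index dict plus a single scatter pass over the edges actually present in the input.


-- matrix[i][j] = v   (List.set is the identity out of range; all our writes are in range)
def pvSet2d (M : List (List Int)) (i j : Nat) (v : Int) : List (List Int) :=
  M.set i ((M.getD i []).set j v)

-- ===== PORT A =====
def generate_adjencacy_matrix (file_dict : List (String × List (String × Int))) : List String × List (List Int) :=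
  let d : PySem.Dict String (List (String × Int)) := PySem.Dict.ofList file_dict
  let cities := PySem.List.sorted d.keys (fun x => x) false
  let n := cities.length
  let adjacency_matrix : List (List Int) :=
    (List.range n).map (fun _ => (List.range n).map (fun _ => (0 : Int)))
  let adjacency_matrix :=
    (List.range n).foldl (fun mat i =>
      (List.range n).foldl (fun mat j =>
        if i ≠ j then
          let from_city := cities.getD i ""
          let to_city := cities.getD j ""
          -- distance = file_dict.get(from_city, {}).get(to_city); 'if distance:' = some nonzero
          match (PySem.Dict.ofList ((d.get? from_city).getD [])).get? to_city with
          | some distance => if distance ≠ 0 then pvSet2d mat i j distance else mat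
          | none => mat
        else mat) mat) adjacency_matrix
  (cities, adjacency_matrix)

-- ===== PORT B =====
def generate_adjencacy_matrix_alt (file_dict : List (String × List (String × Int))) : List String × List (List Int) :=
  let d : PySem.Dict String (List (String × Int)) := PySem.Dict.ofList file_dict
  let cities := PySem.List.sorted d.keys (fun x => x) false
  let idx : PySem.Dict String Nat :=
    ((List.range cities.length).zip cities).foldl (fun a p => a.insert p.2 p.1) PySem.Dict.empty
  let n := cities.length
  let matrix : List (List Int) := (List.range n).map (fun _ => (List.range n).map (fun _ => (0 : Int)))
  let matrix :=
    d.items.foldl (fun mat p =>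
      -- i = idx[from_city]; from_city is always a key of idx (cities = d's keys), so getD never defaults
      let i := (idx.get? p.1).getD 0
      (PySem.Dict.ofList p.2).items.foldl (fun mat q =>
        match idx.get? q.1 with
        | some j => if j ≠ i ∧ q.2 ≠ 0 then pvSet2d mat i j q.2 else mat
        | none => mat) mat) matrix
  (cities, matrix)

-- ===== PRECONDITION & SPEC =====
def Spec_generate_adjencacy_matrix (file_dict : List (String × List (String × Int))) (out : List String × List (List Int)) : Prop := out = generate_adjencacy_matrix_alt file_dict
instance (file_dict : List (String × List (String × Int))) (out : List String × List (List Int)) : Decidable (Spec_generate_adjencacy_matrix file_dict out) := by unfold Spec_generate_adjencacy_matrix; infer_instance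

-- ===== CLAIM (what is proved, stated in full; the proofs are below) =====
def Claim_equal_generate_adjencacy_matrix : Prop := ∀ (file_dict : List (String × List (String × Int))), Dom_generate_adjencacy_matrix file_dict → Spec_generate_adjencacy_matrix file_dict (generate_adjencacy_matrix file_dict)


-- ===== LEMMAS AND PROOFS =====

-- Abbreviations for the common pieces of both ports (proof-side only).
def pvD (fd : List (String × List (String × Int))) : PySem.Dict String (List (String × Int)) :=
  PySem.Dict.ofList fd

def pvCities (fd : List (String × List (String × Int))) : List String :=
  PySem.List.sorted (pvD fd).keys (fun x => x) false

def pvIdx (fd : List (String × List (String × Int))) : PySem.Dict String Nat :=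
  ((List.range (pvCities fd).length).zip (pvCities fd)).foldl (fun a p => a.insert p.2 p.1) PySem.Dict.empty

def pvZ (fd : List (String × List (String × Int))) : List (List Int) :=
  (List.range (pvCities fd).length).map (fun _ => (List.range (pvCities fd).length).map (fun _ => (0 : Int)))

def pvLook (fd : List (String × List (String × Int))) (a b : Nat) : Option Int :=
  (PySem.Dict.ofList (((pvD fd).get? ((pvCities fd).getD a "")).getD [])).get? ((pvCities fd).getD b "")

-- the common target cell value
def pvCell (fd : List (String × List (String × Int))) (a b : Nat) : Int :=
  if a ≠ b then
    (match pvLook fd a b with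
     | some v => if v ≠ 0 then v else 0
     | none => 0)
  else 0

def pvGoal (fd : List (String × List (String × Int))) : List (List Int) :=
  (List.range (pvCities fd).length).map (fun a => (List.range (pvCities fd).length).map (fun b => pvCell fd a b))

-- the two matrix folds, verbatim (the ports are definitionally (cities, pvAmat/pvBmat))
def pvAmat (fd : List (String × List (String × Int))) : List (List Int) :=
  (List.range (pvCities fd).length).foldl (fun mat i =>
    (List.range (pvCities fd).length).foldl (fun mat j =>
      if i ≠ j then
        match (PySem.Dict.ofList (((pvD fd).get? ((pvCities fd).getD i "")).getD [])).get? ((pvCities fd).getD j "") with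
        | some distance => if distance ≠ 0 then pvSet2d mat i j distance else mat
        | none => mat
      else mat) mat) (pvZ fd)

def pvBmat (fd : List (String × List (String × Int))) : List (List Int) :=
  (pvD fd).items.foldl (fun mat p =>
    (PySem.Dict.ofList p.2).items.foldl (fun mat q =>
      match (pvIdx fd).get? q.1 with
      | some j => if j ≠ ((pvIdx fd).get? p.1).getD 0 ∧ q.2 ≠ (0:Int) then pvSet2d mat (((pvIdx fd).get? p.1).getD 0) j q.2 else mat
      | none => mat) mat) (pvZ fd)



theorem pv_portA (fd : List (String × List (String × Int))) :
    generate_adjencacy_matrix fd = (pvCities fd, pvAmat fd) := rfl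

theorem pv_portB (fd : List (String × List (String × Int))) :
    generate_adjencacy_matrix_alt fd = (pvCities fd, pvBmat fd) := rfl

theorem pv_foldl_len {a b : Type} (step : List b -> a -> List b)
    (h : forall m q, (step m q).length = m.length) (L : List a) (M : List b) :
    (L.foldl step M).length = M.length := by
  induction L generalizing M with
  | nil => rfl
  | cons q t ih => rw [List.foldl_cons, ih, h]

theorem pv_set_getD_self {b : Type} (l : List b) (i : Nat) (d : b) :
    l.set i (l.getD i d) = l := by
  by_cases h : i < l.length
  · rw [List.getD_eq_getElem l d h]; exact List.set_getElem_self h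
  · exact List.set_eq_of_length_le (by omega)

theorem pv_getD_set2d_self (M : List (List Int)) (i j : Nat) (v : Int) :
    (pvSet2d M i j v).getD i [] = (M.getD i []).set j v := by
  unfold pvSet2d
  by_cases h : i < M.length
  · simp [List.getD_eq_getElem?_getD, h]
  · rw [List.set_eq_of_length_le (by omega)]
    have h2 : M[i]? = none := List.getElem?_eq_none (by omega)
    simp only [List.getD_eq_getElem?_getD, h2, Option.getD_none, List.set_nil]

theorem pv_foldl_set2d_row {a : Type} (i : Nat) (c : a -> Bool) (J : a -> Nat) (V : a -> Int)
    (L : List a) (M : List (List Int)) :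
    L.foldl (fun m q => if c q then pvSet2d m i (J q) (V q) else m) M
      = M.set i (L.foldl (fun r q => if c q then r.set (J q) (V q) else r) (M.getD i [])) := by
  induction L generalizing M with
  | nil =>
    have := pv_set_getD_self M i ([] : List Int)
    rw [List.getD_eq_getElem?_getD] at this
    simp only [List.foldl_nil]
    exact this.symm
  | cons q t ih =>
    rw [List.foldl_cons, List.foldl_cons]
    by_cases hc : c q = true
    · simp only [hc, if_pos]
      rw [ih, pv_getD_set2d_self]
      unfold pvSet2d
      rw [List.set_set]
    · simp only [hc]
      rw [ih]
      simp

theorem pv_getD_set_self {b : Type} (l : List b) (i : Nat) (x d : b) (h : i < l.length) :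
    (l.set i x).getD i d = x := by
  simp [List.getD_eq_getElem?_getD, h]

theorem pv_getD_set_ne {b : Type} (l : List b) (i j : Nat) (x d : b) (h : i ≠ j) :
    (l.set i x).getD j d = l.getD j d := by
  simp [List.getD_eq_getElem?_getD, List.getElem?_set_ne h]

theorem pv_find?_unique {a : Type} (p : a -> Bool) (x : a) (l : List a) (hx : x ∈ l)
    (hp : p x = true) (hu : forall y, y ∈ l -> p y = true -> y = x) : l.find? p = some x := by
  induction l with
  | nil => cases hx
  | cons q t ih =>
    by_cases hq : p q = true
    · rw [List.find?_cons_of_pos hq, hu q (List.mem_cons_self) hq]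
    · rw [List.find?_cons_of_neg hq]
      have hxt : x ∈ t := by
        rcases List.mem_cons.mp hx with h | h
        · exact absurd (h ▸ hp) hq
        · exact h
      exact ih hxt (fun y hy hpy => hu y (List.mem_cons_of_mem _ hy) hpy)

theorem pv_foldl_rowset_getD {a : Type} (c : a -> Bool) (J : a -> Nat) (V : a -> Int) (b : Nat)
    (L : List a) (r : List Int)
    (hJ : forall q, q ∈ L -> c q = true -> J q < r.length) :
    (L.foldl (fun r q => if c q then r.set (J q) (V q) else r) r).getD b 0
      = (match L.reverse.find? (fun q => c q && J q == b) with
         | some q => V q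
         | none => r.getD b 0) := by
  induction L generalizing r with
  | nil => simp
  | cons q t ih =>
    rw [List.foldl_cons, List.reverse_cons, List.find?_append]
    have hlen : (if c q then r.set (J q) (V q) else r).length = r.length := by
      by_cases hc : c q = true <;> simp [hc]
    rw [ih _ (fun p hp hcp => by rw [hlen]; exact hJ p (List.mem_cons_of_mem _ hp) hcp)]
    cases hf : t.reverse.find? (fun q => c q && J q == b) with
    | some p => simp
    | none =>
      simp only [Option.or_none, List.find?_singleton]
      by_cases hc : c q = true
      · by_cases hb : J q = b
        · have hlt : J q < r.length := hJ q (List.mem_cons_self) hc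
          simp only [hc, if_pos, hb]
          subst hb
          simp [List.getElem?_set, hlt]
        · have hf2 : (J q == b) = false := by simp [hb]
          simp only [hc, if_pos, hf2, Bool.and_false]
          simp [List.getElem?_set, hb]
      · simp only [hc, Bool.false_and]
        simp

theorem pv_foldl_setrow_getD {a : Type} (I : a -> Nat) (F : a -> List Int -> List Int) (idx0 : Nat)
    (L : List a) (M : List (List Int))
    (hnd : (L.map I).Nodup) (hlt : forall q, q ∈ L -> I q < M.length) :
    (L.foldl (fun m q => m.set (I q) (F q (m.getD (I q) []))) M).getD idx0 []
      = (match L.find? (fun q => I q == idx0) with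
         | some q => F q (M.getD idx0 [])
         | none => M.getD idx0 []) := by
  induction L generalizing M with
  | nil => simp
  | cons q t ih =>
    rw [List.foldl_cons]
    have hndt : (t.map I).Nodup := (List.nodup_cons.mp (by simpa using hnd)).2
    have hnotin : I q ∉ t.map I := (List.nodup_cons.mp (by simpa using hnd)).1
    have hlen : (M.set (I q) (F q (M.getD (I q) []))).length = M.length := by simp
    have hltt : ∀ p, p ∈ t → I p < (M.set (I q) (F q (M.getD (I q) []))).length := by
      intro p hp; rw [hlen]; exact hlt p (List.mem_cons_of_mem _ hp)
    rw [ih _ hndt hltt]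
    by_cases hqa : I q = idx0
    · have hfc : List.find? (fun p => I p == idx0) (q :: t) = some q := by
        rw [List.find?_cons_of_pos (by simp [hqa])]
      have hft : t.find? (fun p => I p == idx0) = none := by
        rw [List.find?_eq_none]
        intro p hp hpp
        exact hnotin (hqa ▸ (by simpa using hpp) ▸ List.mem_map_of_mem hp)
      rw [hft, hfc]
      subst hqa
      exact pv_getD_set_self _ _ _ _ (hlt q (List.mem_cons_self))
    · have hfc : List.find? (fun p => I p == idx0) (q :: t) = t.find? (fun p => I p == idx0) := by
        rw [List.find?_cons_of_neg (by simp [hqa])]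
      rw [hfc, pv_getD_set_ne _ _ _ _ _ hqa]


theorem pv_cities_nodup (fd : List (String × List (String × Int))) : (pvCities fd).Nodup := by
  have h1 : (pvD fd).keys.Nodup := PySem.Dict.nodup_keys_ofList fd
  exact ((PySem.List.sorted_perm _ _ _).nodup_iff).mpr h1

theorem pv_mem_cities (fd : List (String × List (String × Int))) (c : String) :
    c ∈ pvCities fd ↔ c ∈ (pvD fd).keys := PySem.List.mem_sorted _ _ _ _

theorem pv_idx_items (fd : List (String × List (String × Int))) :
    (pvIdx fd).items = ((List.range (pvCities fd).length).zip (pvCities fd)).map (fun p => (p.2, p.1)) := by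
  unfold pvIdx
  rw [PySem.Dict.items_foldl_insert_fresh]
  · rfl
  · intro p hp; exact PySem.Dict.contains_empty _
  · have : ((List.range (pvCities fd).length).zip (pvCities fd)).map (fun p => p.2) = pvCities fd := by
      apply List.map_snd_zip
      simp
    rw [this]; exact pv_cities_nodup fd

theorem pv_map_snd_zip_cities (fd : List (String × List (String × Int))) :
    ((List.range (pvCities fd).length).zip (pvCities fd)).map (fun p => p.2) = pvCities fd := by
  apply List.map_snd_zip; simp

theorem pv_idx_keys (fd : List (String × List (String × Int))) :
    (pvIdx fd).keys = pvCities fd := by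
  simp only [PySem.Dict.keys, pv_idx_items, List.map_map]
  exact pv_map_snd_zip_cities fd

theorem pv_idx_get_of_lt (fd : List (String × List (String × Int))) (b : Nat)
    (hb : b < (pvCities fd).length) :
    (pvIdx fd).get? ((pvCities fd).getD b "") = some b := by
  apply PySem.Dict.get?_of_mem_items
  · rw [pv_idx_items]
    apply List.mem_map_of_mem (a := (b, (pvCities fd).getD b ""))
    rw [List.mem_iff_getElem]
    refine ⟨b, by simp [hb], ?_⟩
    rw [List.getElem_zip]
    simp [hb, List.getD_eq_getElem _ _ hb]
  · rw [pv_idx_keys]; exact pv_cities_nodup fd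

theorem pv_idx_get_inv (fd : List (String × List (String × Int))) (c : String) (j : Nat)
    (h : (pvIdx fd).get? c = some j) :
    j < (pvCities fd).length ∧ (pvCities fd).getD j "" = c := by
  have hm := PySem.Dict.mem_items_of_get?_eq_some _ h
  rw [pv_idx_items] at hm
  rcases List.mem_map.mp hm with ⟨p, hp, hpe⟩
  rcases List.mem_iff_getElem.mp hp with ⟨k, hk, hke⟩
  rw [List.getElem_zip] at hke
  have hk2 : k < (pvCities fd).length := by simpa using hk
  have h1 : p.1 = k := by rw [← hke]; simp
  have h2 : p.2 = (pvCities fd)[k] := by rw [← hke]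
  have hj : j = k := by
    have := congrArg Prod.snd hpe; simpa [h1] using this.symm
  have hc : c = (pvCities fd)[k] := by
    have := congrArg Prod.fst hpe; simp at this; rw [← this, h2]
  subst hj
  exact ⟨hk2, by rw [List.getD_eq_getElem _ _ hk2, ← hc]⟩

theorem pv_idx_get_of_mem (fd : List (String × List (String × Int))) (c : String)
    (hc : c ∈ pvCities fd) :
    ∃ b, b < (pvCities fd).length ∧ (pvCities fd).getD b "" = c ∧ (pvIdx fd).get? c = some b := by
  rcases List.mem_iff_getElem.mp hc with ⟨b, hb, hbe⟩
  refine ⟨b, hb, by rw [List.getD_eq_getElem _ _ hb, hbe], ?_⟩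
  have := pv_idx_get_of_lt fd b hb
  rwa [List.getD_eq_getElem _ _ hb, hbe] at this

-- Bool form of A's inner condition
def pvcA (fd : List (String × List (String × Int))) (i j : Nat) : Bool :=
  decide (i ≠ j) && (pvLook fd i j).isSome && decide ((pvLook fd i j).getD 0 ≠ 0)

theorem pv_cell_eq_ite (fd : List (String × List (String × Int))) (a b : Nat) :
    pvCell fd a b = if pvcA fd a b then (pvLook fd a b).getD 0 else 0 := by
  unfold pvCell pvcA
  by_cases hab : a = b
  · simp [hab]
  · cases hG : pvLook fd a b with
    | some v =>
      by_cases hv : v = 0 <;> simp [hab, hG, hv]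
    | none => simp [hab, hG]

theorem pvA_inner_step (fd : List (String × List (String × Int))) (i : Nat) :
    (fun (mat : List (List Int)) (j : Nat) =>
      if i ≠ j then
        match (PySem.Dict.ofList (((pvD fd).get? ((pvCities fd).getD i "")).getD [])).get? ((pvCities fd).getD j "") with
        | some distance => if distance ≠ 0 then pvSet2d mat i j distance else mat
        | none => mat
      else mat)
    = (fun mat j => if pvcA fd i j then pvSet2d mat i j ((pvLook fd i j).getD 0) else mat) := by
  funext mat j
  show (if i ≠ j then
        match pvLook fd i j with
        | some distance => if distance ≠ 0 then pvSet2d mat i j distance else mat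
        | none => mat
      else mat) = _
  unfold pvcA
  by_cases hij : i = j
  · simp [hij]
  · cases hG : pvLook fd i j with
    | some v => by_cases hv : v = 0 <;> simp [hij, hG, hv]
    | none => simp [hij, hG]

theorem pvZ_len (fd : List (String × List (String × Int))) : (pvZ fd).length = (pvCities fd).length := by
  simp [pvZ]

theorem pvZ_row (fd : List (String × List (String × Int))) (a : Nat) (ha : a < (pvCities fd).length) :
    (pvZ fd).getD a [] = (List.range (pvCities fd).length).map (fun _ => (0 : Int)) := by
  rw [List.getD_eq_getElem _ _ (by simp [pvZ_len fd, ha])]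
  simp [pvZ]

theorem pvA_eq (fd : List (String × List (String × Int))) : pvAmat fd = pvGoal fd := by
  unfold pvAmat
  simp only [pvA_inner_step fd]
  simp only [pv_foldl_set2d_row]
  have hzlen := pvZ_len fd
  have hlen1 : ((List.range (pvCities fd).length).foldl
      (fun mat i => mat.set i ((List.range (pvCities fd).length).foldl
        (fun r j => if pvcA fd i j then r.set j ((pvLook fd i j).getD 0) else r) (mat.getD i []))) (pvZ fd)).length
      = (pvCities fd).length := by
    rw [pv_foldl_len _ (fun m q => by simp) _ _, hzlen]
  have hglen : (pvGoal fd).length = (pvCities fd).length := by simp [pvGoal]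
  apply List.ext_getElem (by rw [hlen1, hglen])
  intro a ha1 ha2
  have han : a < (pvCities fd).length := by rwa [hlen1] at ha1
  rw [← List.getD_eq_getElem _ ([] : List Int) ha1, ← List.getD_eq_getElem _ ([] : List Int) ha2]
  rw [pv_foldl_setrow_getD (fun i => i)
      (fun i r => (List.range (pvCities fd).length).foldl
        (fun r j => if pvcA fd i j then r.set j ((pvLook fd i j).getD 0) else r) r) a
      (List.range (pvCities fd).length) (pvZ fd)
      (by simpa using List.nodup_range) (by intro q hq; rw [hzlen]; exact List.mem_range.mp hq)]
  have hfind : (List.range (pvCities fd).length).find? (fun q => q == a) = some a :=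
    pv_find?_unique _ a _ (List.mem_range.mpr han) (by simp) (fun y hy hpy => by simpa using hpy)
  rw [hfind]
  rw [pvZ_row fd a han]
  have hgrow : (pvGoal fd).getD a [] = (List.range (pvCities fd).length).map (fun b => pvCell fd a b) := by
    rw [List.getD_eq_getElem _ _ (by rw [hglen]; exact han)]
    simp [pvGoal]
  rw [hgrow]
  have hrlen : ((List.range (pvCities fd).length).foldl
      (fun r j => if pvcA fd a j then r.set j ((pvLook fd a j).getD 0) else r)
      ((List.range (pvCities fd).length).map (fun _ => (0 : Int)))).length = (pvCities fd).length := by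
    rw [pv_foldl_len _ (fun m q => by by_cases h : pvcA fd a q = true <;> simp [h]) _ _]
    simp
  apply List.ext_getElem (by rw [hrlen]; simp)
  intro b hb1 hb2
  have hbn : b < (pvCities fd).length := by rwa [hrlen] at hb1
  rw [← List.getD_eq_getElem _ (0 : Int) hb1]
  rw [pv_foldl_rowset_getD (pvcA fd a) (fun j => j) (fun j => (pvLook fd a j).getD 0) b
      (List.range (pvCities fd).length) _
      (by intro q hq hc; simp only [List.length_map, List.length_range]; exact List.mem_range.mp hq)]
  have hrhs : ((List.range (pvCities fd).length).map (fun b => pvCell fd a b))[b] = pvCell fd a b := by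
    simp
  rw [hrhs, pv_cell_eq_ite]
  by_cases hcb : pvcA fd a b = true
  · have hfind2 : ((List.range (pvCities fd).length).reverse.find? (fun j => pvcA fd a j && j == b)) = some b :=
      pv_find?_unique _ b _ (by rw [List.mem_reverse]; exact List.mem_range.mpr hbn) (by simp [hcb])
        (fun y hy hpy => by
          simp only [Bool.and_eq_true, beq_iff_eq] at hpy
          exact hpy.2)
    rw [hfind2]
    simp [hcb]
  · have hfind2 : ((List.range (pvCities fd).length).reverse.find? (fun j => pvcA fd a j && j == b)) = none := by
      rw [List.find?_eq_none]
      intro y hy hpy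
      simp only [Bool.and_eq_true, beq_iff_eq] at hpy
      exact hcb (hpy.2 ▸ hpy.1)
    rw [hfind2]
    simp only [hcb, if_false, Bool.false_eq_true]
    rw [List.getD_eq_getElem _ _ (by simpa using hbn)]
    simp

-- Bool form of B's inner condition
def pvcB (fd : List (String × List (String × Int))) (i : Nat) (q : String × Int) : Bool :=
  ((pvIdx fd).get? q.1).isSome && decide (((pvIdx fd).get? q.1).getD 0 ≠ i) && decide (q.2 ≠ 0)

def pvJB (fd : List (String × List (String × Int))) (q : String × Int) : Nat :=
  ((pvIdx fd).get? q.1).getD 0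

theorem pvB_inner_step (fd : List (String × List (String × Int))) (i : Nat) :
    (fun (mat : List (List Int)) (q : String × Int) =>
      match (pvIdx fd).get? q.1 with
      | some j => if j ≠ i ∧ q.2 ≠ (0 : Int) then pvSet2d mat i j q.2 else mat
      | none => mat)
    = (fun mat q => if pvcB fd i q then pvSet2d mat i (pvJB fd q) q.2 else mat) := by
  funext mat q
  unfold pvcB pvJB
  cases h : (pvIdx fd).get? q.1 with
  | none => simp [h]
  | some j =>
    by_cases hj : j = i
    · simp [h, hj]
    · by_cases hv : q.2 = 0
      · simp [h, hj, hv]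
      · simp [h, hj, hv]

theorem pv_items_fst_inj {K V : Type} [BEq K] [LawfulBEq K] (d : PySem.Dict K V)
    (hnd : d.keys.Nodup) {p p' : K × V} (hp : p ∈ d.items) (hp' : p' ∈ d.items)
    (h : p.1 = p'.1) : p = p' := by
  have e1 : d.get? p.1 = some p.2 := PySem.Dict.get?_of_mem_items d (by rwa [Prod.mk.eta]) hnd
  have e2 : d.get? p'.1 = some p'.2 := PySem.Dict.get?_of_mem_items d (by rwa [Prod.mk.eta]) hnd
  rw [h, e2] at e1
  exact Prod.ext h (Option.some.inj e1).symm

theorem pvB_I_spec (fd : List (String × List (String × Int))) (p : String × List (String × Int))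
    (hp : p ∈ (pvD fd).items) :
    ∃ b, b < (pvCities fd).length ∧ (pvCities fd).getD b "" = p.1 ∧ (pvIdx fd).get? p.1 = some b := by
  apply pv_idx_get_of_mem
  rw [pv_mem_cities]
  exact PySem.Dict.mem_keys_of_mem_items _ hp

theorem pvB_eq (fd : List (String × List (String × Int))) : pvBmat fd = pvGoal fd := by
  unfold pvBmat
  simp only [pvB_inner_step fd]
  simp only [pv_foldl_set2d_row]
  have hzlen := pvZ_len fd
  have hknd : (pvD fd).keys.Nodup := PySem.Dict.nodup_keys_ofList fd
  have hIinj : ∀ p ∈ (pvD fd).items, ∀ q ∈ (pvD fd).items,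
      ((pvIdx fd).get? p.1).getD 0 = ((pvIdx fd).get? q.1).getD 0 → p = q := by
    intro p hp q hq h
    obtain ⟨b, hbn, hbe, hbg⟩ := pvB_I_spec fd p hp
    obtain ⟨b', hbn', hbe', hbg'⟩ := pvB_I_spec fd q hq
    rw [hbg, hbg'] at h
    simp only [Option.getD_some] at h
    exact pv_items_fst_inj (pvD fd) hknd hp hq (by rw [← hbe, ← hbe', h])
  have hlen1 : (((pvD fd).items).foldl
      (fun mat p => mat.set (((pvIdx fd).get? p.1).getD 0)
        ((PySem.Dict.ofList p.2).items.foldl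
          (fun r q => if pvcB fd (((pvIdx fd).get? p.1).getD 0) q then r.set (pvJB fd q) q.2 else r)
          (mat.getD (((pvIdx fd).get? p.1).getD 0) []))) (pvZ fd)).length
      = (pvCities fd).length := by
    rw [pv_foldl_len _ (fun m q => by simp) _ _, hzlen]
  have hglen : (pvGoal fd).length = (pvCities fd).length := by simp [pvGoal]
  apply List.ext_getElem (by rw [hlen1, hglen])
  intro a ha1 ha2
  have han : a < (pvCities fd).length := by rwa [hlen1] at ha1
  rw [← List.getD_eq_getElem _ ([] : List Int) ha1, ← List.getD_eq_getElem _ ([] : List Int) ha2]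
  rw [pv_foldl_setrow_getD (fun p => ((pvIdx fd).get? p.1).getD 0)
      (fun p r => (PySem.Dict.ofList p.2).items.foldl
        (fun r q => if pvcB fd (((pvIdx fd).get? p.1).getD 0) q then r.set (pvJB fd q) q.2 else r) r) a
      ((pvD fd).items) (pvZ fd)
      (List.Nodup.map_on hIinj (List.Nodup.of_map _ (by simpa [PySem.Dict.keys] using hknd)))
      (by
        intro p hp
        obtain ⟨b, hbn, hbe, hbg⟩ := pvB_I_spec fd p hp
        show ((pvIdx fd).get? p.1).getD 0 < (pvZ fd).length
        rw [hbg, Option.getD_some, hzlen]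
        exact hbn)]
  -- the unique item writing row a
  have hmem : (pvCities fd).getD a "" ∈ (pvD fd).keys := by
    rw [← pv_mem_cities]
    rw [List.getD_eq_getElem _ _ han]
    exact List.getElem_mem han
  cases hoi : (pvD fd).get? ((pvCities fd).getD a "") with
  | none =>
    exact absurd hmem ((PySem.Dict.get?_eq_none_iff_not_mem_keys _ _).mp hoi)
  | some inner =>
  have hpa : ((pvCities fd).getD a "", inner) ∈ (pvD fd).items :=
    PySem.Dict.mem_items_of_get?_eq_some _ hoi
  have hIget : (pvIdx fd).get? ((pvCities fd).getD a "") = some a := pv_idx_get_of_lt fd a han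
  have hIget' : (pvIdx fd).get? ((pvCities fd)[a]?.getD "") = some a := by
    rw [← List.getD_eq_getElem?_getD]; exact hIget
  have hfind : ((pvD fd).items).find?
      (fun p => ((pvIdx fd).get? p.1).getD 0 == a) = some ((pvCities fd).getD a "", inner) :=
    pv_find?_unique _ _ _ hpa (by simp [hIget, hIget'])
      (fun y hy hpy => by
        simp only [beq_iff_eq] at hpy
        obtain ⟨b, hbn, hbe, hbg⟩ := pvB_I_spec fd y hy
        rw [hbg, Option.getD_some] at hpy
        exact pv_items_fst_inj (pvD fd) hknd hy hpa (by rw [← hbe, hpy]))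
  rw [hfind]
  simp only [hIget, Option.getD_some]
  rw [pvZ_row fd a han]
  have hgrow : (pvGoal fd).getD a [] = (List.range (pvCities fd).length).map (fun b => pvCell fd a b) := by
    rw [List.getD_eq_getElem _ _ (by rw [hglen]; exact han)]
    simp [pvGoal]
  rw [hgrow]
  have hinnd : (PySem.Dict.ofList inner).keys.Nodup := PySem.Dict.nodup_keys_ofList inner
  have hJlt : ∀ q ∈ (PySem.Dict.ofList inner).items, pvcB fd a q = true →
      pvJB fd q < ((List.range (pvCities fd).length).map (fun _ => (0 : Int))).length := by
    intro q hq hc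
    unfold pvcB at hc
    simp only [Bool.and_eq_true, Option.isSome_iff_exists] at hc
    obtain ⟨⟨⟨j0, hj0⟩, _⟩, _⟩ := hc
    have := (pv_idx_get_inv fd _ _ hj0).1
    unfold pvJB
    rw [hj0, Option.getD_some]
    simpa using this
  have hrlen : ((PySem.Dict.ofList inner).items.foldl
      (fun r q => if pvcB fd a q then r.set (pvJB fd q) q.2 else r)
      ((List.range (pvCities fd).length).map (fun _ => (0 : Int)))).length = (pvCities fd).length := by
    rw [pv_foldl_len _ (fun m q => by by_cases h : pvcB fd a q = true <;> simp [h]) _ _]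
    simp
  apply List.ext_getElem (by rw [hrlen]; simp)
  intro b hb1 hb2
  have hbn : b < (pvCities fd).length := by rwa [hrlen] at hb1
  rw [← List.getD_eq_getElem _ (0 : Int) hb1]
  rw [pv_foldl_rowset_getD (pvcB fd a) (pvJB fd) (fun q => q.2) b _ _ hJlt]
  have hrhs : ((List.range (pvCities fd).length).map (fun b => pvCell fd a b))[b] = pvCell fd a b := by
    simp
  rw [hrhs, pv_cell_eq_ite]
  have hlook : pvLook fd a b = (PySem.Dict.ofList inner).get? ((pvCities fd).getD b "") := by
    unfold pvLook
    rw [hoi]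
    rfl
  have hbget : (pvIdx fd).get? ((pvCities fd).getD b "") = some b := pv_idx_get_of_lt fd b hbn
  have hbget' : (pvIdx fd).get? ((pvCities fd)[b]?.getD "") = some b := by
    rw [← List.getD_eq_getElem?_getD]; exact hbget
  by_cases hcb : pvcA fd a b = true
  · have hcb' := hcb
    unfold pvcA at hcb
    simp only [Bool.and_eq_true, Option.isSome_iff_exists, decide_eq_true_eq] at hcb
    obtain ⟨⟨hab, v, hv⟩, hnz⟩ := hcb
    rw [hv, Option.getD_some] at hnz
    have hq0mem : ((pvCities fd).getD b "", v) ∈ (PySem.Dict.ofList inner).items := by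
      apply PySem.Dict.mem_items_of_get?_eq_some
      rw [← hlook]
      exact hv
    have hfind2 : ((PySem.Dict.ofList inner).items.reverse.find?
        (fun q => pvcB fd a q && pvJB fd q == b)) = some ((pvCities fd).getD b "", v) :=
      pv_find?_unique _ _ _ (List.mem_reverse.mpr hq0mem)
        (by
          unfold pvcB pvJB
          simp [hbget, hbget', Ne.symm hab, hnz])
        (fun y hy hpy => by
          simp only [Bool.and_eq_true, beq_iff_eq] at hpy
          obtain ⟨hcy, hjy⟩ := hpy
          unfold pvcB at hcy
          simp only [Bool.and_eq_true, Option.isSome_iff_exists] at hcy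
          obtain ⟨⟨⟨j0, hj0⟩, _⟩, _⟩ := hcy
          unfold pvJB at hjy
          rw [hj0, Option.getD_some] at hjy
          subst hjy
          have hinv := (pv_idx_get_inv fd _ _ hj0).2
          exact pv_items_fst_inj (PySem.Dict.ofList inner) hinnd
            (List.mem_reverse.mp hy) hq0mem (by rw [← hinv]))
    rw [hfind2, if_pos hcb', hv]
    rfl
  · have hfind2 : ((PySem.Dict.ofList inner).items.reverse.find?
        (fun q => pvcB fd a q && pvJB fd q == b)) = none := by
      rw [List.find?_eq_none]
      intro y hy hpy
      simp only [Bool.and_eq_true, beq_iff_eq] at hpy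
      obtain ⟨hcy, hjy⟩ := hpy
      unfold pvcB at hcy
      simp only [Bool.and_eq_true, Option.isSome_iff_exists, decide_eq_true_eq] at hcy
      obtain ⟨⟨⟨j0, hj0⟩, hne⟩, hnz⟩ := hcy
      unfold pvJB at hjy
      rw [hj0, Option.getD_some] at hjy
      subst hjy
      rw [hj0, Option.getD_some] at hne
      have hinv := (pv_idx_get_inv fd _ _ hj0).2
      have hyv : (PySem.Dict.ofList inner).get? y.1 = some y.2 :=
        PySem.Dict.get?_of_mem_items _ (by rwa [Prod.mk.eta, ← List.mem_reverse]) hinnd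
      apply hcb
      unfold pvcA
      rw [hlook, hinv, hyv]
      simp [Ne.symm hne, hnz]
    rw [hfind2, if_neg hcb]
    rw [List.getD_eq_getElem _ _ (by simpa using hbn)]
    simp

-- ===== VERDICT (by name: the statement is the Claim_ definition above) =====
theorem generate_adjencacy_matrix_spec : Claim_equal_generate_adjencacy_matrix := by
  intro fd _
  unfold Spec_generate_adjencacy_matrix
  rw [pv_portA, pv_portB, pvA_eq, pvB_eq]
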